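-- pv_equiv track=rewrite | github.com/mgiorg/University_Code | Python/Intro Prog/LabPython06/A_Ex10.py | A_Ex10
-- ===== SOURCE A (Python) =====
-- def A_Ex10(l):
--     """MODIFICARE IL CONTENUTO DI QUESTA FUNZIONE PER SVOLGERE L'ESERCIZIO"""
--     if l == []:
--         return set()
--     else:
--         insieme = set()
--         for i in range(len(l)):
--             for j in range(len(l)):
--                 if l[i] != l[j] and len(l[i]) == len(l[j]):
--                     insieme.add((l[i], l[j]))
--
--         return insieme
-- ===== SOURCE B (Python) =====
-- def A_Ex10(l):
--     order = list(dict.fromkeys(l))          # distinct values, first-occurrence order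
--     bylen = {}                              # length -> distinct values of that length
--     for s in order:
--         bylen.setdefault(len(s), []).append(s)
--     return {(x, y) for x in order for y in bylen[len(x)] if y != x}
-- ===== Notes on version B (the rewrite author's own statement) =====
-- stated objective: faster
-- what changed: B replaces A's full n^2 index scan (length test and set insertion for every ordered index pair) by deduplicating once and building a length->distinct-values index in one pass, then emitting ordered pairs only within each length group, so the inner scan over the whole list disappears and the work is output-sensitive.
import Mathlib
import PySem

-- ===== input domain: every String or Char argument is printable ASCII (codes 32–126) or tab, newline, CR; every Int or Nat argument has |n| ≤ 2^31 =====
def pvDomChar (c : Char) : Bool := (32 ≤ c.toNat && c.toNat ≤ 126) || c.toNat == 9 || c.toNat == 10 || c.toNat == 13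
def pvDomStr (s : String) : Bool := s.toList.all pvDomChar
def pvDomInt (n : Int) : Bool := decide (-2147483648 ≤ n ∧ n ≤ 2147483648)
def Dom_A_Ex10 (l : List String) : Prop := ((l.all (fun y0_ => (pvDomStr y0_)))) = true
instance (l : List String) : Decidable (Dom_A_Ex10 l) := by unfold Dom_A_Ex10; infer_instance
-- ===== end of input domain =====

-- B builds a length -> distinct-values index once and emits pairs only inside each length group,
-- replacing A's full n^2 index scan with per-pair length test and set insertion (objective: faster on inputs with many distinct lengths).

-- ===== PORT A =====
def A_Ex10 (l : List String) : List (List String) :=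
  if l = [] then []
  else
    (PySem.List.pyRange 0 (l.length : Int) 1).foldl (fun ins i =>
      (PySem.List.pyRange 0 (l.length : Int) 1).foldl (fun ins j =>
        if PySem.List.pyGetD l i "" ≠ PySem.List.pyGetD l j "" ∧
           PySem.Str.len (PySem.List.pyGetD l i "") = PySem.Str.len (PySem.List.pyGetD l j "") then
          PySem.Set.add ins [PySem.List.pyGetD l i "", PySem.List.pyGetD l j ""]
        else ins) ins)
      PySem.Set.empty

-- ===== PORT B =====
def A_Ex10_alt (l : List String) : List (List String) :=
  let order := PySem.List.dedup l
  let bylen := order.foldl (fun d s => d.modify (PySem.Str.len s) [] (· ++ [s])) PySem.Dict.empty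
  PySem.Set.ofList (order.flatMap (fun x =>
    (bylen.getD (PySem.Str.len x) []).filterMap (fun y => if y ≠ x then some [x, y] else none)))

-- ===== PRECONDITION & SPEC =====
def Spec_A_Ex10 (l : List String) (out : List (List String)) : Prop := out = A_Ex10_alt l
instance (l : List String) (out : List (List String)) : Decidable (Spec_A_Ex10 l out) := by unfold Spec_A_Ex10; infer_instance

-- ===== CLAIM (what is proved, stated in full; the proofs are below) =====
def Claim_equal_A_Ex10 : Prop := ∀ (l : List String), Dom_A_Ex10 l → Spec_A_Ex10 l (A_Ex10 l)

-- ===== LEMMAS AND PROOFS =====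

-- the pair generator: some [x,y] exactly when the pair (x,y) is emitted
def pvFx (x y : String) : Option (List String) :=
  if x ≠ y ∧ PySem.Str.len x = PySem.Str.len y then some [x, y] else none

theorem pvMem_update_left {α : Type} [BEq α] [LawfulBEq α] (s : PySem.Set α) (xs : List α)
    {b : α} (hb : b ∈ s) : b ∈ PySem.Set.update s xs := by
  rw [PySem.Set.update_eq_append_filter]
  exact List.mem_append_left _ hb

theorem pvUpdate_of_subset {α : Type} [BEq α] [LawfulBEq α] (s : PySem.Set α) (xs : List α)
    (h : ∀ b ∈ xs, b ∈ s) : PySem.Set.update s xs = s := by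
  rw [PySem.Set.update_eq_append_filter]
  have hnil : List.filter (fun y => !s.contains y) (PySem.Set.ofList xs) = [] := by
    rw [List.filter_eq_nil_iff]
    intro b hb
    have hbs : b ∈ s := h b (by rwa [PySem.Set.mem_ofList] at hb)
    have hc : s.contains b = true := (PySem.Set.contains_iff s b).mpr hbs
    simpa using hbs
  rw [hnil, List.append_nil]

-- an occurrence of x can be dropped from the loop once every element of F x is already in the set
theorem pvFoldl_update_drop {α β : Type} [BEq α] [LawfulBEq α] [BEq β] [LawfulBEq β] (F : α → List β) (x : α)
    (M : List α) (s : PySem.Set β) (hs : ∀ b ∈ F x, b ∈ s) :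
    M.foldl (fun s z => PySem.Set.update s (F z)) s
      = (M.filter (fun y => !(y == x))).foldl (fun s z => PySem.Set.update s (F z)) s := by
  induction M generalizing s with
  | nil => rfl
  | cons y t ih =>
    by_cases hyx : (y == x) = true
    · have hyx' : y = x := eq_of_beq hyx
      subst hyx'
      have hstep : PySem.Set.update s (F y) = s := pvUpdate_of_subset _ _ hs
      simp only [List.filter_cons, hyx, Bool.not_true, List.foldl_cons, hstep]
      exact ih s hs
    · have hs' : ∀ b ∈ F x, b ∈ PySem.Set.update s (F y) :=
        fun b hb => pvMem_update_left _ _ (hs b hb)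
      simp only [List.filter_cons, hyx, Bool.not_false, List.foldl_cons]
      exact ih _ hs'

-- folding over the list equals folding over its deduplication
theorem pvFoldl_update_dedup {α β : Type} [BEq α] [LawfulBEq α] [BEq β] [LawfulBEq β]
    (F : α → List β) (L : List α) (s : PySem.Set β) :
    L.foldl (fun s z => PySem.Set.update s (F z)) s
      = (PySem.Set.ofList L).foldl (fun s z => PySem.Set.update s (F z)) s := by
  induction L generalizing s with
  | nil => rfl
  | cons x t ih =>
    rw [List.foldl_cons, PySem.Set.ofList_cons, List.foldl_cons, PySem.Set.discard.eq_1]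
    have hs' : ∀ b ∈ F x, b ∈ PySem.Set.update s (F x) := by
      intro b hb
      rw [PySem.Set.mem_update]
      exact Or.inr hb
    rw [ih (PySem.Set.update s (F x))]
    exact pvFoldl_update_drop F x (PySem.Set.ofList t) (PySem.Set.update s (F x)) hs'

theorem pvFoldl_update_flatMap {α β : Type} [BEq β] (F : α → List β) (M : List α) (s : PySem.Set β) :
    M.foldl (fun s z => PySem.Set.update s (F z)) s = PySem.Set.update s (M.flatMap F) := by
  induction M generalizing s with
  | nil => simp [PySem.Set.update_eq_foldl]
  | cons x t ih => rw [List.foldl_cons, ih, List.flatMap_cons, PySem.Set.update_append]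

theorem pvUpdate_ofList {α : Type} [BEq α] [LawfulBEq α] (s : PySem.Set α) (xs : List α) :
    PySem.Set.update s (PySem.Set.ofList xs) = PySem.Set.update s xs := by
  rw [PySem.Set.update_eq_append_filter, PySem.Set.update_eq_append_filter, PySem.Set.ofList_ofList]

theorem pvFx_some_shape (x y : String) (b : List String) (h : pvFx x y = some b) : b = [x, y] := by
  unfold pvFx at h
  split at h
  · exact (Option.some.inj h).symm
  · cases h

theorem pvFx_none_filter (x y : String) (hn : pvFx x y = none) (s : List String) :
    (s.filter (fun z => !(z == y))).filterMap (pvFx x) = s.filterMap (pvFx x) := by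
  induction s with
  | nil => rfl
  | cons z t ih =>
    by_cases hzy : z == y
    · have : z = y := LawfulBEq.eq_of_beq hzy
      subst this
      simp [hn, ih]
    · simp [hzy, List.filterMap_cons, ih]

theorem pvFx_some_filter (x y : String) (b : List String) (hs : pvFx x y = some b)
    (s : List String) :
    (s.filterMap (pvFx x)).filter (fun c => !(c == b))
      = (s.filter (fun z => !(z == y))).filterMap (pvFx x) := by
  induction s with
  | nil => rfl
  | cons z t ih =>
    by_cases hzy : z = y
    · subst hzy
      simp only [List.filterMap_cons, hs, List.filter_cons, beq_self_eq_true, Bool.not_true]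
      simp [ih]
    · cases hfz : pvFx x z with
      | none => simp [hfz, hzy, ih]
      | some c =>
        have hcb : c ≠ b := by
          rw [pvFx_some_shape x z c hfz, pvFx_some_shape x y b hs]
          simp [hzy]
        simp [hfz, hzy, hcb, ih]

theorem pvOfList_filterMap (x : String) (L : List String) :
    PySem.Set.ofList (L.filterMap (pvFx x)) = (PySem.Set.ofList L).filterMap (pvFx x) := by
  induction L with
  | nil => rfl
  | cons y t ih =>
    rw [List.filterMap_cons]
    cases hfy : pvFx x y with
    | none =>
      rw [ih, PySem.Set.ofList_cons, List.filterMap_cons, hfy, PySem.Set.discard.eq_1,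
        pvFx_none_filter x y hfy]
    | some b =>
      rw [PySem.Set.ofList_cons, ih, PySem.Set.discard.eq_1,
        pvFx_some_filter x y b hfy (PySem.Set.ofList t),
        PySem.Set.ofList_cons, List.filterMap_cons, hfy, PySem.Set.discard.eq_1]

theorem pvInner_fold (x : String) (M : List String) (s : PySem.Set (List String)) :
    M.foldl (fun s y =>
        if x ≠ y ∧ PySem.Str.len x = PySem.Str.len y then PySem.Set.add s [x, y] else s) s
      = PySem.Set.update s (M.filterMap (pvFx x)) := by
  induction M generalizing s with
  | nil => rw [List.filterMap_nil, PySem.Set.update_eq_foldl, List.foldl_nil, List.foldl_nil]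
  | cons y t ih =>
    rw [List.foldl_cons, List.filterMap_cons]
    cases hf : pvFx x y with
    | none =>
      have hc : ¬ (x ≠ y ∧ PySem.Str.len x = PySem.Str.len y) := by
        intro h
        unfold pvFx at hf
        rw [if_pos h] at hf
        cases hf
      rw [if_neg hc, ih]
    | some b =>
      have hb : b = [x, y] := pvFx_some_shape x y b hf
      have hc : x ≠ y ∧ PySem.Str.len x = PySem.Str.len y := by
        by_contra h
        unfold pvFx at hf
        rw [if_neg h] at hf
        cases hf
      rw [if_pos hc, ih, PySem.Set.update_eq_foldl, PySem.Set.update_eq_foldl, List.foldl_cons, hb]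

-- B's length index: the group stored at L is exactly the distinct values of length L, in order
theorem pvBylen_getD (u : List String) (L : Int) :
    (u.foldl (fun d s => d.modify (PySem.Str.len s) [] (· ++ [s])) PySem.Dict.empty).getD L []
      = u.filter (fun y => PySem.Str.len y == L) := by
  have h1 : u.foldl (fun d s => d.modify (PySem.Str.len s) [] (· ++ [s])) PySem.Dict.empty
      = (u.map (fun z => (PySem.Str.len z, z))).foldl
          (fun (d : PySem.Dict Int (List String)) p => d.modify p.1 [] (· ++ [p.2]))
          PySem.Dict.empty := by
    rw [List.foldl_map]
  rw [h1, PySem.Dict.getD_foldl_modify_append, PySem.Dict.getD_empty, List.nil_append]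
  clear h1
  induction u with
  | nil => rfl
  | cons y t ih =>
    rw [List.map_cons, List.filter_cons, List.filter_cons]
    by_cases hy : (PySem.Str.len y == L) = true
    · rw [if_pos hy, if_pos hy, List.map_cons, ih]
    · rw [if_neg hy, if_neg hy, ih]

-- restricting the inner scan to the length group loses nothing
theorem pvGroup_filterMap (x : String) (u : List String) :
    (u.filter (fun y => PySem.Str.len y == PySem.Str.len x)).filterMap
        (fun y => if y ≠ x then some [x, y] else none)
      = u.filterMap (pvFx x) := by
  induction u with
  | nil => rfl
  | cons y t ih =>
    rw [List.filter_cons, List.filterMap_cons]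
    by_cases hl : PySem.Str.len y = PySem.Str.len x
    · rw [if_pos (by simpa using hl), List.filterMap_cons]
      by_cases hyx : y = x
      · subst hyx
        have h1 : pvFx y y = none := by simp [pvFx]
        rw [h1, if_neg (fun h : y ≠ y => h rfl), ih]
      · have h1 : pvFx x y = some [x, y] := by
          unfold pvFx
          rw [if_pos ⟨fun h => hyx h.symm, hl.symm⟩]
        rw [h1, if_pos hyx, ih]
    · have h1 : pvFx x y = none := by
        unfold pvFx
        exact if_neg (fun h => hl h.2.symm)
      rw [if_neg (by simpa using hl), h1, ih]

-- B in reduced form: the distinct-value pair list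
theorem pvAlt_eq (l : List String) :
    A_Ex10_alt l
      = PySem.Set.ofList ((PySem.List.dedup l).flatMap (fun x =>
          (PySem.List.dedup l).filterMap (pvFx x))) := by
  unfold A_Ex10_alt
  have h : (fun x => ((PySem.List.dedup l).foldl
        (fun d s => d.modify (PySem.Str.len s) [] (· ++ [s])) PySem.Dict.empty).getD
          (PySem.Str.len x) [] |>.filterMap (fun y => if y ≠ x then some [x, y] else none))
      = fun x => (PySem.List.dedup l).filterMap (pvFx x) := by
    funext x
    rw [pvBylen_getD, pvGroup_filterMap]
  simp only [h]

-- ===== VERDICT (by name: the statement is the Claim_ definition above) =====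
theorem A_Ex10_spec : Claim_equal_A_Ex10 := by
  intro l _
  unfold Spec_A_Ex10 A_Ex10
  rw [pvAlt_eq]
  by_cases hl : l = []
  · subst hl; rfl
  · rw [if_neg hl]
    have hin : ∀ (x : String) (s : PySem.Set (List String)),
        (PySem.List.pyRange 0 (l.length : Int) 1).foldl
          (fun ins j => if x ≠ PySem.List.pyGetD l j "" ∧
              PySem.Str.len x = PySem.Str.len (PySem.List.pyGetD l j "") then
            PySem.Set.add ins [x, PySem.List.pyGetD l j ""] else ins) s
        = PySem.Set.update s ((PySem.Set.ofList l).filterMap (pvFx x)) := by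
      intro x s
      rw [PySem.List.foldl_pyRange_zero_pyGetD' l ""
        (fun ins y => if x ≠ y ∧ PySem.Str.len x = PySem.Str.len y then
          PySem.Set.add ins [x, y] else ins) s]
      rw [pvInner_fold x l s, ← pvOfList_filterMap, pvUpdate_ofList]
    have hout : (fun (ins : PySem.Set (List String)) (i : Int) =>
          (PySem.List.pyRange 0 (l.length : Int) 1).foldl
            (fun ins j => if PySem.List.pyGetD l i "" ≠ PySem.List.pyGetD l j "" ∧
                PySem.Str.len (PySem.List.pyGetD l i "") = PySem.Str.len (PySem.List.pyGetD l j "") then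
              PySem.Set.add ins [PySem.List.pyGetD l i "", PySem.List.pyGetD l j ""] else ins) ins)
        = (fun ins i =>
            PySem.Set.update ins ((PySem.Set.ofList l).filterMap (pvFx (PySem.List.pyGetD l i "")))) := by
      funext ins i
      exact hin (PySem.List.pyGetD l i "") ins
    rw [hout,
      PySem.List.foldl_pyRange_zero_pyGetD' l ""
        (fun ins x => PySem.Set.update ins ((PySem.Set.ofList l).filterMap (pvFx x))) PySem.Set.empty,
      pvFoldl_update_dedup, pvFoldl_update_flatMap, PySem.Set.update_empty]
    simp only [PySem.List.dedup_eq_ofList]
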